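-- pv_equiv track=rewrite | github.com/rikoarik/merchant-closepay-core | apps/member-base/tools/app-manager/config_io.py | normalize_tenant_id
-- ===== SOURCE A (Python) =====
-- def normalize_tenant_id(tenant_id: str) -> str:
--     """Normalize tenant ID to lowercase kebab-case format."""
--     if not tenant_id:
--         return tenant_id
--     # Convert to lowercase
--     normalized = tenant_id.lower()
--     # Replace spaces and underscores with dashes
--     normalized = normalized.replace(' ', '-').replace('_', '-')
--     # Remove multiple consecutive dashes
--     while '--' in normalized:
--         normalized = normalized.replace('--', '-')
--     # Remove leading/trailing dashes
--     normalized = normalized.strip('-')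
--     return normalized
-- ===== SOURCE B (Python) =====
-- def normalize_tenant_id(tenant_id: str) -> str:
--     """Normalize tenant ID to lowercase kebab-case format."""
--     if not tenant_id:
--         return tenant_id
--     # Single pass: collect separator-free runs, then join them with single dashes.
--     tokens = []
--     cur = []
--     for ch in tenant_id.lower():
--         if ch in ' _-':
--             if cur:
--                 tokens.append(''.join(cur))
--                 cur = []
--         else:
--             cur.append(ch)
--     if cur:
--         tokens.append(''.join(cur))
--     return '-'.join(tokens)
-- ===== Notes on version B (the rewrite author's own statement) =====
-- stated objective: idiomatic
-- what changed: Replaces A's chain of replace calls, repeated collapse passes over double dashes and final strip with a single character scan that gathers separator-free runs and joins them with single dashes.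
import Mathlib
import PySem

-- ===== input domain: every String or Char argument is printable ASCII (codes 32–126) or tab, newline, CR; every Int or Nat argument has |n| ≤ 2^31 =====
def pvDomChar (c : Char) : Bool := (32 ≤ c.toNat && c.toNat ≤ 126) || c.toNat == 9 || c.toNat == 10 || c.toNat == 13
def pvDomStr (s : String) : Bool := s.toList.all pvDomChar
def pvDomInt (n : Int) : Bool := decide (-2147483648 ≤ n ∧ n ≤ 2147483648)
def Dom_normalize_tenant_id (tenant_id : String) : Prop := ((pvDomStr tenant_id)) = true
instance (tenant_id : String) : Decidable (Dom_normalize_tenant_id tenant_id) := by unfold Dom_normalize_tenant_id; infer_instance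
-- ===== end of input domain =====

-- B replaces A's replace-chain, repeated '--'-collapse passes and final strip with a single
-- character scan that gathers separator-free runs and joins them with single dashes.
-- ===== PORT A =====

-- helper mirroring A's repeated str.replace('--','-') (the lemmas up to pvRep2_length_lt are
-- cited by pvCollapse's termination proof)
def pvRep2 : List Char → List Char
  | [] => []
  | [c] => [c]
  | c1 :: c2 :: t => if c1 = '-' ∧ c2 = '-' then '-' :: pvRep2 t else c1 :: pvRep2 (c2 :: t)

theorem pvGo2 (fuel : Nat) : ∀ (l acc : List Char), l.length ≤ fuel →
    PySem.Chars.replace.go ['-', '-'] ['-'] fuel l acc = acc.reverse ++ pvRep2 l := by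
  induction fuel with
  | zero =>
    intro l acc h
    have : l = [] := by cases l <;> simp_all
    subst this
    simp [PySem.Chars.replace.go, pvRep2]
  | succ n ih =>
    intro l acc h
    match l with
    | [] => simp [PySem.Chars.replace.go, pvRep2]
    | [c] =>
      rw [PySem.Chars.replace.go]
      have hpre : List.isPrefixOf ['-','-'] [c] = false := by simp [List.isPrefixOf]
      simp only [hpre, Bool.false_eq_true, if_false]
      rw [ih [] (c :: acc) (by simp)]
      simp [pvRep2]
    | c1 :: c2 :: t =>
      rw [PySem.Chars.replace.go]
      by_cases hd : c1 = '-' ∧ c2 = '-'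
      · obtain ⟨h1, h2⟩ := hd
        subst h1; subst h2
        have hpre : List.isPrefixOf ['-','-'] ('-' :: '-' :: t) = true := by simp [List.isPrefixOf]
        simp only [hpre, if_true, List.drop_succ_cons, List.drop_zero, List.length]
        rw [ih t (['-'].reverse ++ acc) (by simp at h ⊢; omega)]
        simp [pvRep2]
      · have hpre : List.isPrefixOf ['-','-'] (c1 :: c2 :: t) = false := by
          simp [List.isPrefixOf]; tauto
        simp only [hpre, Bool.false_eq_true, if_false]
        rw [ih (c2 :: t) (c1 :: acc) (by simp at h ⊢; omega)]
        simp [pvRep2, hd]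

theorem pvReplace_dd (l : List Char) : PySem.Chars.replace l ['-','-'] ['-'] = pvRep2 l := by
  rw [PySem.Chars.replace]
  simp
  rw [pvGo2 l.length l [] (le_refl _)]
  simp

theorem pvRep2_length_le (l : List Char) : (pvRep2 l).length ≤ l.length := by
  induction l using pvRep2.induct with
  | case1 => simp [pvRep2]
  | case2 c => simp [pvRep2]
  | case3 c1 c2 t hd ih => simp [pvRep2, hd]; simp at ih; omega
  | case4 c1 c2 t hd ih => simp [pvRep2, hd]; simpa using ih

theorem pvRep2_length_lt (l : List Char) (h : ['-','-'] <:+: l) : (pvRep2 l).length < l.length := by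
  induction l using pvRep2.induct with
  | case1 => simp at h
  | case2 c =>
    exfalso
    obtain ⟨s, t, hst⟩ := h
    have := congrArg List.length hst
    simp at this; omega
  | case3 c1 c2 t hd ih =>
    have := pvRep2_length_le t
    simp [pvRep2, hd]; omega
  | case4 c1 c2 t hd ih =>
    have hlt : (pvRep2 (c2 :: t)).length < (c2 :: t).length := by
      apply ih
      rcases List.infix_cons_iff.mp h with hp | hi
      · exfalso
        obtain ⟨u, hu⟩ := hp
        cases hu
        exact hd ⟨rfl, rfl⟩
      · exact hi
    simp [pvRep2, hd]; simp at hlt; omega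

-- A's `while '--' in normalized:` loop
def pvCollapse (s : String) : String :=
  if PySem.Str.isIn "--" s then pvCollapse (PySem.Str.replace s "--" "-") else s
termination_by s.toList.length
decreasing_by
  rename_i h
  have hinf : ['-','-'] <:+: s.toList := by
    have := (PySem.Str.isIn_iff_infix (sub := "--") (s := s)).mp h
    simpa using this
  have : (PySem.Str.replace s "--" "-").toList = pvRep2 s.toList := by
    rw [PySem.Str.toList_replace]
    rw [show ("--" : String).toList = ['-','-'] from rfl, show ("-" : String).toList = ['-'] from rfl]
    exact pvReplace_dd _
  rw [this]
  exact pvRep2_length_lt _ hinf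

def normalize_tenant_id (tenant_id : String) : String :=
  if tenant_id = "" then tenant_id
  else
    let n1 := PySem.Str.lower tenant_id
    let n2 := PySem.Str.replace (PySem.Str.replace n1 " " "-") "_" "-"
    let n3 := pvCollapse n2
    PySem.Str.stripChars n3 "-"

-- ===== PORT B =====
def pvSep (c : Char) : Bool := c = ' ' || c = '_' || c = '-'

def pvScan : List Char → List (List Char) → List Char → List (List Char)
  | [], toks, cur => if cur.isEmpty then toks else toks ++ [cur]
  | c :: rest, toks, cur =>
    if pvSep c then
      if cur.isEmpty then pvScan rest toks [] else pvScan rest (toks ++ [cur]) []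
    else pvScan rest toks (cur ++ [c])

def normalize_tenant_id_alt (tenant_id : String) : String :=
  if tenant_id = "" then tenant_id
  else String.ofList (PySem.Chars.join ['-'] (pvScan (PySem.Chars.lower tenant_id.toList) [] []))

-- ===== PRECONDITION & SPEC =====
def Spec_normalize_tenant_id (tenant_id : String) (out : String) : Prop := out = normalize_tenant_id_alt tenant_id
instance (tenant_id : String) (out : String) : Decidable (Spec_normalize_tenant_id tenant_id out) := by unfold Spec_normalize_tenant_id; infer_instance

-- ===== CLAIM (what is proved, stated in full; the proofs are below) =====
def Claim_equal_normalize_tenant_id : Prop := ∀ (tenant_id : String), Dom_normalize_tenant_id tenant_id → Spec_normalize_tenant_id tenant_id (normalize_tenant_id tenant_id)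

-- ===== LEMMAS AND PROOFS =====
theorem pvRep2_sublist (l : List Char) : (pvRep2 l).Sublist l := by
  induction l using pvRep2.induct with
  | case1 => simp [pvRep2]
  | case2 c => simp [pvRep2]
  | case3 c1 c2 t hd ih =>
    obtain ⟨h1, h2⟩ := hd; subst h1; subst h2
    simp only [pvRep2, and_self, if_true]
    exact List.Sublist.cons₂ _ (List.Sublist.cons _ ih)
  | case4 c1 c2 t hd ih =>
    simp only [pvRep2, if_neg hd]
    exact List.Sublist.cons₂ _ ih

-- proofs-side canonical tokenization
def pvNs (c : Char) : Bool := !pvSep c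

def pvParts : List Char → List (List Char)
  | [] => []
  | c :: t =>
    if pvSep c then pvParts t
    else (c :: t.takeWhile pvNs) :: pvParts (t.dropWhile pvNs)
termination_by l => l.length
decreasing_by
  · simp
  · have := List.length_dropWhile_le pvNs t
    simp; omega

theorem pvScan_inv (l : List Char) : ∀ (toks : List (List Char)) (cur : List Char),
    pvScan l toks cur = toks ++ (if cur.isEmpty then pvParts l
      else (cur ++ l.takeWhile pvNs) :: pvParts (l.dropWhile pvNs)) := by
  induction l with
  | nil =>
    intro toks cur
    cases cur <;> simp [pvScan, pvParts]
  | cons c rest ih =>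
    intro toks cur
    by_cases hc : pvSep c = true
    · have hns : pvNs c = false := by simp [pvNs, hc]
      cases cur with
      | nil =>
        simp only [pvScan, hc, if_true, List.isEmpty_nil]
        rw [ih toks []]
        simp [pvParts, hc]
      | cons x xs =>
        simp only [pvScan, hc, if_true, List.isEmpty_cons]
        rw [ih (toks ++ [x :: xs]) []]
        simp [pvParts, hc, hns]
    · have hns : pvNs c = true := by simp [pvNs, hc]
      simp only [pvScan, hc, Bool.false_eq_true, if_false]
      rw [ih toks (cur ++ [c])]
      cases cur <;> simp [pvParts, hc, hns, ]

theorem pvScan_eq_parts (l : List Char) : pvScan l [] [] = pvParts l := by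
  rw [pvScan_inv]; simp

theorem pvGo1 (a b : Char) (fuel : Nat) : ∀ (l acc : List Char), l.length ≤ fuel →
    PySem.Chars.replace.go [a] [b] fuel l acc
      = acc.reverse ++ l.map (fun c => if c = a then b else c) := by
  induction fuel with
  | zero =>
    intro l acc h
    have : l = [] := by cases l <;> simp_all
    subst this
    simp [PySem.Chars.replace.go]
  | succ n ih =>
    intro l acc h
    match l with
    | [] => simp [PySem.Chars.replace.go]
    | c :: t =>
      rw [PySem.Chars.replace.go]
      by_cases hc : c = a
      · subst hc
        have hpre : List.isPrefixOf [c] (c :: t) = true := by simp [List.isPrefixOf]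
        simp only [hpre, if_true, List.drop_succ_cons, List.drop_zero, List.length]
        rw [ih t ([b].reverse ++ acc) (by simp at h ⊢; omega)]
        simp
      · have hpre : List.isPrefixOf [a] (c :: t) = false := by simp [List.isPrefixOf]; exact fun hh => hc hh.symm
        simp only [hpre, Bool.false_eq_true, if_false]
        rw [ih t (c :: acc) (by simp at h ⊢; omega)]
        simp [hc]

theorem pvReplace_single (a b : Char) (l : List Char) :
    PySem.Chars.replace l [a] [b] = l.map (fun c => if c = a then b else c) := by
  rw [PySem.Chars.replace]
  simp
  rw [pvGo1 a b l.length l [] (le_refl _)]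
  simp

def pvSub (c : Char) : Char := if pvSep c then '-' else c

theorem pvReplace_two (l : List Char) :
    PySem.Chars.replace (PySem.Chars.replace l [' '] ['-']) ['_'] ['-'] = l.map pvSub := by
  rw [pvReplace_single, pvReplace_single, List.map_map]
  apply List.map_congr_left
  intro c _
  by_cases h1 : c = ' ' <;> by_cases h2 : c = '_' <;> simp [pvSub, pvSep, h1, h2]

theorem pvSep_sub (c : Char) : pvSep (pvSub c) = pvSep c := by
  by_cases h : pvSep c = true
  · simp [pvSub, h]; decide
  · simp [pvSub, h]

theorem pvNs_sub (c : Char) : pvNs (pvSub c) = pvNs c := by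
  simp [pvNs, pvSep_sub]

theorem pvMap_sub_id (u : List Char) (h : ∀ c ∈ u, pvNs c = true) : u.map pvSub = u := by
  induction u with
  | nil => rfl
  | cons x xs ih =>
    have hx : pvNs x = true := h x (by simp)
    have : pvSub x = x := by simp [pvSub]; simp [pvNs] at hx; simp [hx]
    simp [this, ih (fun c hc => h c (by simp [hc]))]

theorem pvParts_map_sub (l : List Char) : pvParts (l.map pvSub) = pvParts l := by
  induction hn : l.length using Nat.strong_induction_on generalizing l with
  | _ n ih =>
  subst hn
  cases l with
  | nil => rfl
  | cons c t =>
    by_cases hc : pvSep c = true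
    · have : pvSep (pvSub c) = true := by rw [pvSep_sub]; exact hc
      simp only [List.map_cons, pvParts, this, hc, if_true]
      exact ih t.length (by simp) t rfl
    · have hns : pvSep (pvSub c) = false := by rw [pvSep_sub]; simpa using hc
      have hsubc : pvSub c = c := by simp [pvSub, hc]
      simp only [List.map_cons, pvParts, hc, Bool.false_eq_true, if_false, hsubc]
      rw [List.takeWhile_map, List.dropWhile_map]
      have hfun : (pvNs ∘ pvSub) = pvNs := by funext x; simp [Function.comp, pvNs_sub]
      rw [hfun]
      rw [pvMap_sub_id _ (fun c hc => List.mem_takeWhile_imp hc)]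
      rw [ih (List.dropWhile pvNs t).length
        (by have := List.length_dropWhile_le pvNs t; simp; omega) _ rfl]

theorem pvRep2_cons (c : Char) (t : List Char) (h : ¬(c = '-' ∧ t.head? = some '-')) :
    pvRep2 (c :: t) = c :: pvRep2 t := by
  cases t with
  | nil => rfl
  | cons c2 t2 =>
    have : ¬(c = '-' ∧ c2 = '-') := by
      intro ⟨h1, h2⟩; exact h ⟨h1, by simp [h2]⟩
    simp [pvRep2, this]

theorem pvTD (l : List Char) :
    List.takeWhile pvNs (pvRep2 l) = List.takeWhile pvNs l ∧
    List.dropWhile pvNs (pvRep2 l) = pvRep2 (List.dropWhile pvNs l) := by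
  induction l using pvRep2.induct with
  | case1 => simp [pvRep2]
  | case2 c =>
    by_cases h : pvNs c = true <;> simp [pvRep2, List.takeWhile, List.dropWhile, h]
  | case3 c1 c2 t hd ih =>
    obtain ⟨h1, h2⟩ := hd; subst h1; subst h2
    have hns : pvNs '-' = false := by decide
    simp only [pvRep2, and_self, if_true]
    simp [List.takeWhile_cons, List.dropWhile_cons, hns, pvRep2]
  | case4 c1 c2 t hd ih =>
    simp only [pvRep2, if_neg hd]
    by_cases h : pvNs c1 = true
    · simp [List.takeWhile_cons, List.dropWhile_cons, h, ih.1, ih.2]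
    · simp at h
      simp [List.takeWhile_cons, List.dropWhile_cons, h, pvRep2, hd]

theorem pvParts_rep2 (l : List Char) : pvParts (pvRep2 l) = pvParts l := by
  induction hn : l.length using Nat.strong_induction_on generalizing l with
  | _ n ih =>
  subst hn
  cases l with
  | nil => rfl
  | cons c t =>
    by_cases hsep : pvSep c = true
    · by_cases hdd : c = '-' ∧ t.head? = some '-'
      · obtain ⟨h1, h2⟩ := hdd
        subst h1
        cases t with
        | nil => simp at h2
        | cons c2 t2 =>
          simp at h2; subst h2
          simp only [pvRep2, and_self, if_true]
          have e1 : pvParts ('-' :: pvRep2 t2) = pvParts (pvRep2 t2) := by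
            simp [pvParts, show pvSep '-' = true from by decide]
          have e2 : pvParts ('-' :: '-' :: t2) = pvParts t2 := by
            simp [pvParts, show pvSep '-' = true from by decide]
          rw [e1, e2, ih t2.length (by simp) t2 rfl]
      · rw [pvRep2_cons c t hdd]
        simp only [pvParts, hsep, if_true]
        exact ih t.length (by simp) t rfl
    · have hdd : ¬(c = '-' ∧ t.head? = some '-') := by
        intro ⟨h1, _⟩; subst h1; exact hsep (by decide)
      rw [pvRep2_cons c t hdd]
      have hns : pvNs c = true := by simp [pvNs, hsep]
      simp only [pvParts, hsep, Bool.false_eq_true, if_false]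
      rw [(pvTD t).1, (pvTD t).2]
      rw [ih (List.dropWhile pvNs t).length
        (by have := List.length_dropWhile_le pvNs t; simp; omega) _ rfl]

def pvCLoop (l : List Char) : List Char :=
  if PySem.Chars.isIn ['-','-'] l then pvCLoop (pvRep2 l) else l
termination_by l.length
decreasing_by
  rename_i h
  exact pvRep2_length_lt _ (((PySem.Chars.isIn_iff_infix _ _).mp h))

theorem pvIsIn_dd (s : String) : PySem.Str.isIn "--" s = PySem.Chars.isIn ['-','-'] s.toList := rfl

theorem pvCollapse_toList (s : String) : (pvCollapse s).toList = pvCLoop s.toList := by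
  induction hn : s.toList.length using Nat.strong_induction_on generalizing s with
  | _ n ih =>
  subst hn
  rw [pvCollapse, pvCLoop]
  by_cases h : PySem.Chars.isIn ['-','-'] s.toList = true
  · rw [pvIsIn_dd, if_pos h, if_pos h]
    have hrep : (PySem.Str.replace s "--" "-").toList = pvRep2 s.toList := by
      rw [PySem.Str.toList_replace]
      exact pvReplace_dd _
    rw [ih (PySem.Str.replace s "--" "-").toList.length
      (by rw [hrep]; exact pvRep2_length_lt _ (((PySem.Chars.isIn_iff_infix _ _).mp h))) _ rfl]
    rw [hrep]
  · rw [pvIsIn_dd, if_neg (by simpa using h), if_neg (by simpa using h)]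

theorem pvCLoop_parts (l : List Char) : pvParts (pvCLoop l) = pvParts l := by
  induction hn : l.length using Nat.strong_induction_on generalizing l with
  | _ n ih =>
  subst hn
  rw [pvCLoop]
  by_cases h : PySem.Chars.isIn ['-','-'] l = true
  · rw [if_pos h]
    rw [ih (pvRep2 l).length (pvRep2_length_lt _ (((PySem.Chars.isIn_iff_infix _ _).mp h))) _ rfl]
    exact pvParts_rep2 l
  · rw [if_neg (by simpa using h)]

theorem pvCLoop_nodd (l : List Char) : PySem.Chars.isIn ['-','-'] (pvCLoop l) = false := by
  induction hn : l.length using Nat.strong_induction_on generalizing l with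
  | _ n ih =>
  subst hn
  rw [pvCLoop]
  by_cases h : PySem.Chars.isIn ['-','-'] l = true
  · rw [if_pos h]
    exact ih (pvRep2 l).length (pvRep2_length_lt _ (((PySem.Chars.isIn_iff_infix _ _).mp h))) _ rfl
  · rw [if_neg (by simpa using h)]; simpa using h

theorem pvCLoop_mem (l : List Char) (c : Char) (h : c ∈ pvCLoop l) : c ∈ l := by
  induction hn : l.length using Nat.strong_induction_on generalizing l with
  | _ n ih =>
  subst hn
  rw [pvCLoop] at h
  by_cases hin : PySem.Chars.isIn ['-','-'] l = true
  · rw [if_pos hin] at h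
    exact (pvRep2_sublist l).mem
      (ih (pvRep2 l).length (pvRep2_length_lt _ (((PySem.Chars.isIn_iff_infix _ _).mp hin))) _ h rfl)
  · rwa [if_neg (by simpa using hin)] at h

theorem pvJoin_nil : PySem.Chars.join ['-'] [] = [] := by
  simp [PySem.Chars.join, List.intercalate]

theorem pvJoin_single (a : List Char) : PySem.Chars.join ['-'] [a] = a := by
  simp [PySem.Chars.join, List.intercalate]

theorem pvJoin_cons (a : List Char) (ps : List (List Char)) (h : ps ≠ []) :
    PySem.Chars.join ['-'] (a :: ps) = a ++ '-' :: PySem.Chars.join ['-'] ps := by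
  cases ps with
  | nil => exact absurd rfl h
  | cons b t => simp [PySem.Chars.join, List.intercalate]

def pvP (c : Char) : Bool := (['-'] : List Char).contains c

theorem pvP_eq (c : Char) : pvP c = decide (c = '-') := by
  by_cases h : c = '-'
  · subst h; decide
  · unfold pvP
    simp [h]

theorem pvStripChars_eq (l : List Char) :
    PySem.Chars.stripChars l ['-'] = (List.dropWhile pvP ((List.dropWhile pvP l).reverse)).reverse := by
  rfl

theorem pvNs_no_dash (c : Char) (h : pvNs c = true) : pvP c = false := by
  rw [pvP_eq]
  simp [pvNs, pvSep] at h
  simp [h.2]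

theorem pvDrop_rev_runfree (a : List Char) (ha : ∀ x ∈ a, pvNs x = true) :
    List.dropWhile pvP a.reverse = a.reverse := by
  cases hrev : a.reverse with
  | nil => simp
  | cons y ys =>
    have hy : y ∈ a := by
      have : y ∈ a.reverse := by rw [hrev]; simp
      simpa using this
    rw [List.dropWhile_cons, pvNs_no_dash y (ha y hy)]
    simp

theorem pvSep_dash : pvSep '-' = true := by decide
theorem pvP_dash : pvP '-' = true := by decide

theorem pvStrip_eq_join (l : List Char)
    (hnodd : PySem.Chars.isIn ['-','-'] l = false)
    (hH : ∀ c ∈ l, c ≠ ' ' ∧ c ≠ '_') :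
    (List.dropWhile pvP ((List.dropWhile pvP l).reverse)).reverse
      = PySem.Chars.join ['-'] (pvParts l) := by
  induction hn : l.length using Nat.strong_induction_on generalizing l with
  | _ n ih =>
  subst hn
  cases l with
  | nil => rw [show pvParts ([] : List Char) = [] from by simp [pvParts], pvJoin_nil]; simp
  | cons c t =>
    by_cases hsep : pvSep c = true
    · have h2 := hH c (by simp)
      have hcd : c = '-' := by simp [pvSep, h2.1, h2.2] at hsep; exact hsep
      subst hcd
      cases t with
      | nil =>
        rw [show pvParts ['-'] = [] from by simp [pvParts, pvSep_dash], pvJoin_nil]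
        decide
      | cons d t2 =>
        have hd : d ≠ '-' := by
          intro hdd; subst hdd
          rw [PySem.Chars.isIn_eq_false_iff] at hnodd
          exact hnodd ⟨[], t2, rfl⟩
        have hpd : pvP d = false := by rw [pvP_eq]; simp [hd]
        have hstep : List.dropWhile pvP ('-' :: d :: t2) = d :: t2 := by
          simp [List.dropWhile_cons, pvP_dash, hpd]
        rw [hstep, show pvParts ('-' :: d :: t2) = pvParts (d :: t2) from by
          simp [pvParts, pvSep_dash]]
        have h1 : List.dropWhile pvP (d :: t2) = d :: t2 := by
          simp [List.dropWhile_cons, hpd]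
        have hmain := ih (d :: t2).length (by simp) (d :: t2) ?_ ?_ rfl
        · rw [h1] at hmain; exact hmain
        · rw [PySem.Chars.isIn_eq_false_iff] at hnodd ⊢
          intro hinf
          exact hnodd (hinf.trans (List.suffix_cons '-' (d :: t2)).isInfix)
        · intro x hx; exact hH x (by simp at hx ⊢; tauto)
    · have hnsc : pvNs c = true := by simp [pvNs, hsep]
      have hpc : pvP c = false := pvNs_no_dash c hnsc
      have hdw1 : List.dropWhile pvP (c :: t) = c :: t := by
        simp [List.dropWhile_cons, hpc]
      rw [hdw1, show pvParts (c :: t)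
          = (c :: List.takeWhile pvNs t) :: pvParts (List.dropWhile pvNs t) from by
        simp [pvParts, hsep]]
      have haNs : ∀ x ∈ c :: List.takeWhile pvNs t, pvNs x = true := by
        intro x hx
        rcases List.mem_cons.mp hx with h | h
        · subst h; exact hnsc
        · exact List.mem_takeWhile_imp h
      cases hdrop : List.dropWhile pvNs t with
      | nil =>
        have hta : c :: t = c :: List.takeWhile pvNs t := by
          conv_lhs => rw [show t = List.takeWhile pvNs t ++ List.dropWhile pvNs t from
            List.takeWhile_append_dropWhile.symm, hdrop]
          simp
        rw [show pvParts ([] : List Char) = [] from by simp [pvParts], pvJoin_single, hta,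
          pvDrop_rev_runfree _ haNs, List.reverse_reverse]
      | cons e r' =>
        have hlform : c :: t = (c :: List.takeWhile pvNs t) ++ e :: r' := by
          conv_lhs => rw [show t = List.takeWhile pvNs t ++ List.dropWhile pvNs t from
            List.takeWhile_append_dropWhile.symm, hdrop]
          rw [List.cons_append]
        have hnse : pvNs e = false := by
          have := List.head?_dropWhile_not pvNs t
          rw [hdrop] at this
          simpa using this
        have heH : e ≠ ' ' ∧ e ≠ '_' := by
          apply hH; rw [hlform]; simp
        have hed : e = '-' := by
          simp [pvNs, pvSep, heH.1, heH.2] at hnse; exact hnse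
        subst hed
        cases r' with
        | nil =>
          rw [show pvParts ['-'] = [] from by simp [pvParts, pvSep_dash], pvJoin_single]
          rw [hlform, List.reverse_append, show (['-'] : List Char).reverse = ['-'] from rfl,
            List.singleton_append, List.dropWhile_cons]
          simp only [pvP_dash, if_true]
          rw [pvDrop_rev_runfree _ haNs, List.reverse_reverse]
        | cons d r'' =>
          have hdne : d ≠ '-' := by
            intro hdd; subst hdd
            rw [PySem.Chars.isIn_eq_false_iff] at hnodd
            apply hnodd
            have hsuf : '-' :: '-' :: r'' <:+ c :: t := by
              rw [hlform]; exact ⟨c :: List.takeWhile pvNs t, rfl⟩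
            exact (List.infix_iff_prefix_suffix.mpr
              ⟨'-' :: '-' :: r'', ⟨⟨r'', rfl⟩, hsuf⟩⟩)
          have hdH : d ≠ ' ' ∧ d ≠ '_' := by
            apply hH; rw [hlform]; simp
          have hdns : pvNs d = true := by
            simp [pvNs, pvSep, hdne, hdH.1, hdH.2]
          have hpd : pvP d = false := pvNs_no_dash d hdns
          have hrev : (c :: t).reverse
              = (d :: r'').reverse ++ ('-' :: (c :: List.takeWhile pvNs t).reverse) := by
            rw [hlform, List.reverse_append]
            simp
          have hne : List.dropWhile pvP (d :: r'').reverse ≠ [] := by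
            intro hcontra
            rw [List.dropWhile_eq_nil_iff] at hcontra
            have := hcontra d (by simp)
            rw [hpd] at this
            exact Bool.false_ne_true this
          rw [hrev, List.dropWhile_append, if_neg (by simpa using hne), List.reverse_append,
            List.reverse_cons, List.reverse_reverse]
          have hih := ih (d :: r'').length ?_ (d :: r'') ?_ ?_ rfl
          · have hdwr : List.dropWhile pvP (d :: r'') = d :: r'' := by
              simp [List.dropWhile_cons, hpd]
            rw [hdwr] at hih
            rw [show pvParts ('-' :: d :: r'') = pvParts (d :: r'') from by
              simp [pvParts, pvSep_dash]]
            have hsepd : pvSep d = false := by simpa [pvNs] using hdns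
            have hpne : pvParts (d :: r'') ≠ [] := by
              simp [pvParts, hsepd]
            rw [pvJoin_cons _ _ hpne, ← hih]
            simp
          · have : (c :: t).length
                = (c :: List.takeWhile pvNs t).length + 1 + (d :: r'').length := by
              rw [hlform]; simp; omega
            rw [this]; omega
          · rw [PySem.Chars.isIn_eq_false_iff] at hnodd ⊢
            intro hinf
            apply hnodd
            have hsuf : d :: r'' <:+ c :: t := by
              rw [hlform]; exact ⟨(c :: List.takeWhile pvNs t) ++ ['-'], by simp⟩
            exact hinf.trans hsuf.isInfix
          · intro x hx
            apply hH
            rw [hlform]; simp at hx ⊢; tauto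

theorem pvFinal (s : String) (hs : ¬ s = "") :
    normalize_tenant_id s = normalize_tenant_id_alt s := by
  rw [normalize_tenant_id, normalize_tenant_id_alt, if_neg hs, if_neg hs]
  show PySem.Str.stripChars _ "-" = _
  rw [show ∀ (x : String), PySem.Str.stripChars x "-"
      = String.ofList (PySem.Chars.stripChars x.toList ['-']) from fun _ => rfl]
  apply congrArg
  rw [pvScan_eq_parts]
  have hm : (PySem.Str.replace (PySem.Str.replace (PySem.Str.lower s) " " "-") "_" "-").toList
      = (PySem.Chars.lower s.toList).map pvSub := by
    rw [PySem.Str.toList_replace, PySem.Str.toList_replace]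
    rw [show (" " : String).toList = [' '] from rfl, show ("-" : String).toList = ['-'] from rfl,
      show ("_" : String).toList = ['_'] from rfl]
    rw [PySem.Str.toList_lower]
    exact pvReplace_two _
  rw [pvCollapse_toList, hm]
  rw [pvStripChars_eq]
  have hHm : ∀ c ∈ pvCLoop ((PySem.Chars.lower s.toList).map pvSub), c ≠ ' ' ∧ c ≠ '_' := by
    intro c hcmem
    have hmem := pvCLoop_mem _ _ hcmem
    obtain ⟨x, hx, rfl⟩ := List.mem_map.mp hmem
    unfold pvSub
    by_cases hpx : pvSep x = true
    · simp [hpx]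
    · simp [hpx]
      simp [pvSep] at hpx
      exact ⟨hpx.1.1, hpx.1.2⟩
  rw [pvStrip_eq_join _ (pvCLoop_nodd _) hHm, pvCLoop_parts, pvParts_map_sub]

-- ===== VERDICT (by name: the statement is the Claim_ definition above) =====
theorem normalize_tenant_id_spec : Claim_equal_normalize_tenant_id := by
  intro s _
  unfold Spec_normalize_tenant_id
  by_cases hs : s = ""
  · rw [normalize_tenant_id, normalize_tenant_id_alt, if_pos hs, if_pos hs]
  · exact pvFinal s hs
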